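-- pv_equiv track=rewrite | github.com/drodda/advent_of_code | aoc_2019/challenge_06.py | path_between
-- ===== SOURCE A (Python) =====
-- def node_parents_list(node, nodes_parent):
--     """ Return a list of the parent of node, parnet of parnet of node, ... """
--     result = []
--     while node in nodes_parent:
--         parent = nodes_parent[node]
--         result.append(parent)
--         node = parent
--     return result
--
-- def path_between(node_a, node_b, nodes_parent):
--     """ Calculate the path between node_a and node_b using each node's parent """
--     path_a = node_parents_list(node_a, nodes_parent)
--     path_b = node_parents_list(node_b, nodes_parent)
--     if path_a[-1] != path_b[-1]:
--         return None
--     common_node = path_a[-1]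
--     while path_a and path_b and path_a[-1] == path_b[-1]:
--         common_node = path_a[-1]
--         path_a.pop()
--         path_b.pop()
--     # Reverse path_b as it will be traversed backwards
--     path_b.reverse()
--     result = path_a + [common_node] + path_b
--     return result
-- ===== SOURCE B (Python) =====
-- def path_between(node_a, node_b, nodes_parent):
--     """ Path between node_a and node_b via their ancestor chains: if the roots differ
--     there is no path; otherwise the first of b's ancestors that is also an ancestor
--     of a is their lowest common ancestor. """
--     anc_a = []
--     node = node_a
--     while node in nodes_parent:
--         node = nodes_parent[node]
--         anc_a.append(node)
--     anc_b = []
--     node = node_b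
--     while node in nodes_parent:
--         node = nodes_parent[node]
--         anc_b.append(node)
--     if anc_a[-1] != anc_b[-1]:
--         return None
--     seen = set(anc_a)
--     for j, node in enumerate(anc_b):
--         if node in seen:
--             return anc_a[:anc_a.index(node)] + [node] + anc_b[:j][::-1]
-- ===== Notes on version B (the rewrite author's own statement) =====
-- stated objective: alternative
-- what changed: A checks the roots and then pops the common suffix off both ancestor lists from the back, taking the last popped element as the LCA; B instead puts a's ancestors in a hash set and scans b's ancestor list forward for the first shared node (the LCA), assembling anc_a[:index(lca)] + [lca] + reversed prefix of anc_b. Pre_ excludes inputs where node_a or node_b has no parent (both A and B raise IndexError at the [-1] root check) and inputs whose parent chain cycles (the while loops never end).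
import Mathlib
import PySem

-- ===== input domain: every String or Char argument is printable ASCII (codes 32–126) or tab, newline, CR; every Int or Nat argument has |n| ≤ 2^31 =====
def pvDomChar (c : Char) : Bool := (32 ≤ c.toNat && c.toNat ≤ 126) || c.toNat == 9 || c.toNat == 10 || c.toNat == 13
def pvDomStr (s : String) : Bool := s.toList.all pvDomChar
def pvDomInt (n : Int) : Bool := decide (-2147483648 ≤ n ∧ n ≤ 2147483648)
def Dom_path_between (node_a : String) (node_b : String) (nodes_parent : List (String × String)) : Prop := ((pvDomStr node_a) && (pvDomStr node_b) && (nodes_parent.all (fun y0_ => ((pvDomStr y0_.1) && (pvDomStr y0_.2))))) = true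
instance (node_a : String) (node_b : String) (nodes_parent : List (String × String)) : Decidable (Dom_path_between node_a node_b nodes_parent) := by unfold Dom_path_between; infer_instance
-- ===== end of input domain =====

-- B replaces A's pop-the-common-suffix loop by a hash set of a's ancestors and a forward scan of
-- b's ancestor list to the first shared ancestor (alternative algorithm, same cost).

-- ===== PORT A =====
-- A's 'while node in nodes_parent: parent = nodes_parent[node]; result.append(parent); node = parent'.
-- The fuel only bounds the walk (under Pre_ the chain ends within nodes_parent.length steps).
def pvNplLoop (nodes_parent : List (String × String)) : Nat → String → List String → List String
  | 0, _, result => result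
  | fuel + 1, node, result =>
    match (PySem.Dict.mk nodes_parent).get? node with
    | none => result
    | some parent => pvNplLoop nodes_parent fuel parent (result ++ [parent])

def node_parents_list (node : String) (nodes_parent : List (String × String)) : List String :=
  pvNplLoop nodes_parent (nodes_parent.length + 1) node []

-- A's 'while path_a and path_b and path_a[-1] == path_b[-1]: common_node = path_a[-1]; pop; pop'.
def pvPopLoop (path_a path_b : List String) (common_node : String) :
    List String × List String × String :=
  match ha : path_a.getLast?, path_b.getLast? with
  | some x, some y =>
    if x = y then pvPopLoop path_a.dropLast path_b.dropLast x
    else (path_a, path_b, common_node)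
  | none, _ => (path_a, path_b, common_node)
  | some _, none => (path_a, path_b, common_node)
termination_by path_a.length
decreasing_by
  have hne : path_a ≠ [] := by rintro rfl; simp at ha
  have := List.length_pos_iff.mpr hne
  simp [List.length_dropLast]; omega

def path_between (node_a : String) (node_b : String) (nodes_parent : List (String × String)) : Option (List String) :=
  let path_a := node_parents_list node_a nodes_parent
  let path_b := node_parents_list node_b nodes_parent
  match path_a.getLast?, path_b.getLast? with
  | some ra, some rb =>
    if ra ≠ rb then none
    else
      let r := pvPopLoop path_a path_b ra
      some (r.1 ++ [r.2.2] ++ r.2.1.reverse)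
  | _, _ => none   -- Python raises IndexError at path_a[-1]/path_b[-1] here; excluded by Pre_

-- ===== PORT B =====
-- B's two ancestor loops: 'while node in nodes_parent: node = nodes_parent[node]; anc.append(node)'.
-- The fuel only bounds the walk (under Pre_ the chain ends within nodes_parent.length steps).
def pvAncLoop (nodes_parent : List (String × String)) : Nat → String → List String → List String
  | 0, _, anc => anc
  | fuel + 1, node, anc =>
    match (PySem.Dict.mk nodes_parent).get? node with
    | none => anc
    | some p => pvAncLoop nodes_parent fuel p (anc ++ [p])

-- B's 'for j, node in enumerate(anc_b): if node in seen: return …'; the counter j of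
-- enumerate is a non-negative index, carried as a Nat and cast for the slice anc_b[:j];
-- 'anc_b[:j][::-1]' is ported as slice + reverse; falling off the loop returns None.
def pvFindLoop (anc_a : List String) (seen : PySem.Set String) (anc_b : List String) :
    List String → Nat → Option (List String)
  | [], _ => none
  | node :: rest, j =>
    if PySem.Set.contains seen node then
      match PySem.List.index? anc_a node with
      | some i => some (PySem.List.slice anc_a none (some (i : Int)) ++ [node] ++
                        (PySem.List.slice anc_b none (some (j : Int))).reverse)
      | none => none   -- unreachable: node ∈ seen = set(anc_a) means anc_a.index(node) succeeds
    else pvFindLoop anc_a seen anc_b rest (j + 1)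

def path_between_alt (node_a : String) (node_b : String) (nodes_parent : List (String × String)) : Option (List String) :=
  let anc_a := pvAncLoop nodes_parent (nodes_parent.length + 1) node_a []
  let anc_b := pvAncLoop nodes_parent (nodes_parent.length + 1) node_b []
  -- 'anc_a[-1] != anc_b[-1]' via pyGet? (none = IndexError, excluded by Pre_)
  match PySem.List.pyGet? anc_a (-1), PySem.List.pyGet? anc_b (-1) with
  | some ra, some rb =>
    if ra ≠ rb then none
    else
      let seen := PySem.Set.ofList anc_a
      pvFindLoop anc_a seen anc_b anc_b 0
  | none, _ => none
  | some _, none => none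

-- ===== PRECONDITION & SPEC =====
-- one step of the parent map (stays put on a non-key; used only to state termination of the chains)
def pvStep (nodes_parent : List (String × String)) (x : String) : String :=
  match (PySem.Dict.mk nodes_parent).get? x with
  | some p => p
  | none => x

-- Pre_: node_a and node_b each have a parent (else Python A raises IndexError at path[-1]), and both
-- parent chains terminate within nodes_parent.length steps, i.e. no cycle (else A loops forever).
def Pre_path_between (node_a : String) (node_b : String) (nodes_parent : List (String × String)) : Prop :=
  ((PySem.Dict.mk nodes_parent).get? node_a).isSome ∧
  ((PySem.Dict.mk nodes_parent).get? node_b).isSome ∧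
  (PySem.Dict.mk nodes_parent).get? ((pvStep nodes_parent)^[nodes_parent.length] node_a) = none ∧
  (PySem.Dict.mk nodes_parent).get? ((pvStep nodes_parent)^[nodes_parent.length] node_b) = none

instance (node_a : String) (node_b : String) (nodes_parent : List (String × String)) : Decidable (Pre_path_between node_a node_b nodes_parent) := by unfold Pre_path_between; infer_instance

def pvWitness_path_between : String × String × (List (String × String)) :=
  ("a", "b", [("a", "r"), ("b", "r")])

def Spec_path_between (node_a : String) (node_b : String) (nodes_parent : List (String × String)) (out : Option (List String)) : Prop := out = path_between_alt node_a node_b nodes_parent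
instance (node_a : String) (node_b : String) (nodes_parent : List (String × String)) (out : Option (List String)) : Decidable (Spec_path_between node_a node_b nodes_parent out) := by unfold Spec_path_between; infer_instance

-- ===== CLAIM (what is proved, stated in full; the proofs are below) =====
def Claim_equal_path_between : Prop := ∀ (node_a : String) (node_b : String) (nodes_parent : List (String × String)), Dom_path_between node_a node_b nodes_parent → Pre_path_between node_a node_b nodes_parent → Spec_path_between node_a node_b nodes_parent (path_between node_a node_b nodes_parent)

-- ===== LEMMAS AND PROOFS =====

-- cons-style view of the fuelled parent walk (proof-side only)
def pvChainF (nodes_parent : List (String × String)) : Nat → String → List String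
  | 0, _ => []
  | fuel + 1, x =>
    match (PySem.Dict.mk nodes_parent).get? x with
    | none => []
    | some p => p :: pvChainF nodes_parent fuel p

-- 'l is the full parent chain of x'
def pvIsChain (f : String → Option String) : String → List String → Prop
  | x, [] => f x = none
  | x, p :: l => f x = some p ∧ pvIsChain f p l

theorem pvNplLoop_eq_chainF (mp : List (String × String)) :
    ∀ (fuel : Nat) (x : String) (acc : List String),
      pvNplLoop mp fuel x acc = acc ++ pvChainF mp fuel x := by
  intro fuel
  induction fuel with
  | zero => intro x acc; simp [pvNplLoop, pvChainF]
  | succ n ih =>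
    intro x acc
    simp only [pvNplLoop, pvChainF]
    cases (PySem.Dict.mk mp).get? x with
    | none => simp
    | some p => simp [ih]

theorem pvAncLoop_eq_chainF (mp : List (String × String)) :
    ∀ (fuel : Nat) (x : String) (acc : List String),
      pvAncLoop mp fuel x acc = acc ++ pvChainF mp fuel x := by
  intro fuel
  induction fuel with
  | zero => intro x acc; simp [pvAncLoop, pvChainF]
  | succ n ih =>
    intro x acc
    simp only [pvAncLoop, pvChainF]
    cases (PySem.Dict.mk mp).get? x with
    | none => simp
    | some p => simp [ih]

theorem pvChainF_isChain (mp : List (String × String)) :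
    ∀ (n : Nat) (x : String),
      (PySem.Dict.mk mp).get? ((pvStep mp)^[n] x) = none →
      pvIsChain (fun y => (PySem.Dict.mk mp).get? y) x (pvChainF mp (n + 1) x) := by
  intro n
  induction n with
  | zero => intro x h; simp at h; simp [pvChainF, pvIsChain, h]
  | succ m ih =>
    intro x h
    rw [Function.iterate_succ_apply] at h
    simp only [pvChainF]
    cases hx : (PySem.Dict.mk mp).get? x with
    | none => simp [pvIsChain, hx]
    | some p =>
      have hstep : pvStep mp x = p := by simp [pvStep, hx]
      rw [hstep] at h
      exact ⟨hx, ih p h⟩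

theorem pvIsChain_det (f : String → Option String) :
    ∀ (l1 : List String) (x : String) (l2 : List String),
      pvIsChain f x l1 → pvIsChain f x l2 → l1 = l2 := by
  intro l1
  induction l1 with
  | nil =>
    intro x l2 h1 h2
    cases l2 with
    | nil => rfl
    | cons q t => simp [pvIsChain] at h1 h2; rw [h1] at h2; exact absurd h2.1 (by simp)
  | cons p t ih =>
    intro x l2 h1 h2
    cases l2 with
    | nil => simp [pvIsChain] at h1 h2; rw [h2] at h1; exact absurd h1.1 (by simp)
    | cons q t2 =>
      simp [pvIsChain] at h1 h2
      have hpq : p = q := by rw [h1.1] at h2; exact (Option.some_inj.mp h2.1)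
      subst hpq
      rw [ih p t2 h1.2 h2.2]

theorem pvIsChain_suffix (f : String → Option String) :
    ∀ (u : List String) (x y : String) (v : List String),
      pvIsChain f x (u ++ y :: v) → pvIsChain f y v := by
  intro u
  induction u with
  | nil => intro x y v h; exact h.2
  | cons z t ih =>
    intro x y v h
    exact ih z y v h.2





-- first element of l that lies in 'seen', with the pieces around it
def pvFindSplit (seen : List String) : List String → Option (List String × String × List String)
  | [] => none
  | y :: t =>
    if y ∈ seen then some ([], y, t)
    else (pvFindSplit seen t).map (fun qhr => (y :: qhr.1, qhr.2.1, qhr.2.2))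

theorem pvFindSplit_none (seen : List String) :
    ∀ (l : List String), pvFindSplit seen l = none → ∀ y ∈ l, y ∉ seen := by
  intro l
  induction l with
  | nil => intro _ y hy; simp at hy
  | cons z t ih =>
    intro h y hy
    by_cases hz : z ∈ seen
    · simp [pvFindSplit, hz] at h
    · simp only [pvFindSplit, if_neg hz, Option.map_eq_none_iff] at h
      rcases List.mem_cons.mp hy with rfl | hy
      · exact hz
      · exact ih h y hy

theorem pvFindSplit_some (seen : List String) :
    ∀ (l q : List String) (h : String) (r : List String),
      pvFindSplit seen l = some (q, h, r) →
      l = q ++ h :: r ∧ h ∈ seen ∧ ∀ y ∈ q, y ∉ seen := by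
  intro l
  induction l with
  | nil => intro q h r hf; simp [pvFindSplit] at hf
  | cons z t ih =>
    intro q h r hf
    by_cases hz : z ∈ seen
    · simp only [pvFindSplit, if_pos hz, Option.some_inj, Prod.mk.injEq] at hf
      obtain ⟨rfl, rfl, rfl⟩ := hf
      exact ⟨by simp, hz, by simp⟩
    · simp only [pvFindSplit, if_neg hz] at hf
      cases ht : pvFindSplit seen t with
      | none => rw [ht] at hf; simp at hf
      | some v =>
        obtain ⟨q', h2, r2⟩ := v
        rw [ht] at hf
        simp only [Option.map_some, Option.some_inj, Prod.mk.injEq] at hf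
        rcases hf with ⟨rfl, rfl, rfl⟩
        obtain ⟨ht1, ht2, ht3⟩ := ih _ _ _ ht
        refine ⟨by simp [ht1], ht2, ?_⟩
        intro y hy
        rcases List.mem_cons.mp hy with rfl | hy
        · exact hz
        · exact ht3 y hy

-- B's for loop, characterised by pvFindSplit on the unscanned tail of anc_b
theorem pvFindLoop_spec (anc_a lb : List String) :
    ∀ (rest pre : List String), lb = pre ++ rest →
      pvFindLoop anc_a (PySem.Set.ofList anc_a) lb rest pre.length =
        match pvFindSplit (PySem.Set.ofList anc_a) rest with
        | none => none
        | some (q, h, _) =>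
          match PySem.List.index? anc_a h with
          | some i => some (PySem.List.slice anc_a none (some (i : Int)) ++ [h] ++ (pre ++ q).reverse)
          | none => none := by
  intro rest
  induction rest with
  | nil => intro pre _; simp [pvFindLoop, pvFindSplit]
  | cons node r ih =>
    intro pre hlb
    simp only [pvFindLoop, pvFindSplit]
    by_cases hp : node ∈ (PySem.Set.ofList anc_a : List String)
    · rw [if_pos ((PySem.Set.contains_iff _ _).mpr hp), if_pos hp]
      have hslice : PySem.List.slice lb none (some ((pre.length : Nat) : Int)) = pre := by
        rw [PySem.List.slice_to_natCast lb pre.length, hlb, List.take_left]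
      cases hidx : PySem.List.index? anc_a node with
      | none => rw [PySem.List.index?_eq_idxOf?] at hidx; simp [hidx]
      | some i => rw [PySem.List.index?_eq_idxOf?] at hidx; simp [hidx, hslice]
    · rw [if_neg (by simp [hp]), if_neg hp]
      have hpre : lb = (pre ++ [node]) ++ r := by simp [hlb]
      have := ih (pre ++ [node]) hpre
      simp only [List.length_append, List.length_cons, List.length_nil] at this
      rw [show pre.length + 1 = pre.length + (0 + 1) by omega, this]
      cases hs : pvFindSplit (PySem.Set.ofList anc_a) r with
      | none => simp
      | some v =>
        obtain ⟨q, h, r2⟩ := v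
        simp only [Option.map_some]
        cases PySem.List.index? anc_a h with
        | none => simp
        | some i => simp

-- stop case of A's pop loop
theorem pvPopLoop_stop (pa pb : List String) (c : String)
    (h : ∀ x y, pa.getLast? = some x → pb.getLast? = some y → x ≠ y) :
    pvPopLoop pa pb c = (pa, pb, c) := by
  rw [pvPopLoop.eq_def]
  split
  · rename_i x y hx hy
    rw [if_neg (h x y hx hy)]
  · rfl
  · rfl

-- A's pop loop on two lists whose common suffix is h :: s, where p and q cannot be popped further
theorem pvPopLoop_main (p q : List String) (h : String)
    (hstop : ∀ x y, p.getLast? = some x → q.getLast? = some y → x ≠ y) :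
    ∀ (s : List String) (c : String),
      pvPopLoop (p ++ h :: s) (q ++ h :: s) c = (p, q, h) := by
  intro s
  induction s using List.reverseRecOn with
  | nil =>
    intro c
    rw [pvPopLoop.eq_def]
    split
    · rename_i x y hx hy
      rw [List.getLast?_concat] at hx hy
      obtain rfl := Option.some_inj.mp hx
      obtain rfl := Option.some_inj.mp hy
      rw [if_pos rfl, List.dropLast_concat, List.dropLast_concat]
      exact pvPopLoop_stop p q h hstop
    · rename_i _ heq
      rw [List.getLast?_concat] at heq
      exact absurd heq (by simp)
    · rename_i val h1 h2
      rw [List.getLast?_concat] at h2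
      exact absurd h2 (by simp)
  | append_singleton s' z ih =>
    intro c
    rw [show p ++ h :: (s' ++ [z]) = (p ++ h :: s') ++ [z] by simp,
        show q ++ h :: (s' ++ [z]) = (q ++ h :: s') ++ [z] by simp]
    rw [pvPopLoop.eq_def]
    split
    · rename_i x y hx hy
      rw [List.getLast?_concat] at hx hy
      obtain rfl := Option.some_inj.mp hx
      obtain rfl := Option.some_inj.mp hy
      rw [if_pos rfl, List.dropLast_concat, List.dropLast_concat]
      exact ih z
    · rename_i _ heq
      rw [List.getLast?_concat] at heq
      exact absurd heq (by simp)
    · rename_i val h1 h2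
      rw [List.getLast?_concat] at h2
      exact absurd h2 (by simp)

-- ===== VERDICT (by name: the statement is the Claim_ definition above) =====
theorem path_between_spec : Claim_equal_path_between := by
  unfold Claim_equal_path_between
  intro a b mp _ hPre
  obtain ⟨ha, hb, hta, htb⟩ := hPre
  unfold Spec_path_between path_between path_between_alt node_parents_list
  simp only [pvNplLoop_eq_chainF, pvAncLoop_eq_chainF, List.nil_append]
  set la := pvChainF mp (mp.length + 1) a with hla_def
  set lb := pvChainF mp (mp.length + 1) b with hlb_def
  have hca : pvIsChain (fun y => (PySem.Dict.mk mp).get? y) a la := pvChainF_isChain mp _ a hta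
  have hcb : pvIsChain (fun y => (PySem.Dict.mk mp).get? y) b lb := pvChainF_isChain mp _ b htb
  -- both chains are nonempty
  have hlane : la ≠ [] := by
    obtain ⟨p, hp⟩ := Option.isSome_iff_exists.mp ha
    rw [hla_def]; simp [pvChainF, hp]
  have hlbne : lb ≠ [] := by
    obtain ⟨p, hp⟩ := Option.isSome_iff_exists.mp hb
    rw [hlb_def]; simp [pvChainF, hp]
  clear_value la lb
  obtain ⟨ra0, hra0⟩ := Option.isSome_iff_exists.mp (List.getLast?_isSome.mpr hlane)
  obtain ⟨rb0, hrb0⟩ := Option.isSome_iff_exists.mp (List.getLast?_isSome.mpr hlbne)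
  rw [PySem.List.pyGet?_neg_one, PySem.List.pyGet?_neg_one, hra0, hrb0]
  by_cases hr : ra0 = rb0
  · subst hr
    rw [show (0 : Nat) = ([] : List String).length from rfl,
        pvFindLoop_spec la lb lb [] (by simp)]
    cases hsplit : pvFindSplit (PySem.Set.ofList la) lb with
    | none =>
      -- impossible: the shared root rb0 = ra0 lies in both chains
      exact absurd ((PySem.Set.mem_ofList _ _).mpr (List.mem_of_getLast? hra0))
        (pvFindSplit_none _ lb hsplit ra0 (List.mem_of_getLast? hrb0))
    | some v =>
      obtain ⟨q, h, r⟩ := v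
      obtain ⟨hlbeq, hhseen, hqout⟩ := pvFindSplit_some _ lb q h r hsplit
      have hhla : h ∈ la := (PySem.Set.mem_ofList _ _).mp hhseen
      obtain ⟨i, hi⟩ := Option.isSome_iff_exists.mp ((PySem.List.index?_isSome_iff la h).mpr hhla)
      obtain ⟨pre, suf, hlaeq, hprelen, hhpre⟩ := (PySem.List.index?_eq_some_iff la h i).mp hi
      -- the two chains share the exact suffix h :: r
      have hsuf1 : pvIsChain (fun y => (PySem.Dict.mk mp).get? y) h suf :=
        pvIsChain_suffix _ pre a h suf (hlaeq ▸ hca)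
      have hsuf2 : pvIsChain (fun y => (PySem.Dict.mk mp).get? y) h r :=
        pvIsChain_suffix _ q b h r (hlbeq ▸ hcb)
      have hsufr : suf = r := pvIsChain_det _ suf h r hsuf1 hsuf2
      subst hsufr
      have hstop : ∀ x y, pre.getLast? = some x → q.getLast? = some y → x ≠ y := by
        intro x y hx hy rfl
        exact hqout x (List.mem_of_getLast? hy)
          ((PySem.Set.mem_ofList _ _).mpr (hlaeq ▸ List.mem_append_left _ (List.mem_of_getLast? hx)))
      have hpop : pvPopLoop la lb ra0 = (pre, q, h) := by
        rw [hlaeq, hlbeq]; exact pvPopLoop_main pre q h hstop suf ra0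
      have htake : List.take i la = pre := by rw [← hprelen, hlaeq, List.take_left]
      have hi2 : List.idxOf? h la = some i := by rw [← PySem.List.index?_eq_idxOf?]; exact hi
      simp [hpop, hi2, htake]
  · simp [hr]
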